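-- pv_equiv track=rewrite | github.com/pypi-data/pypi-mirror-380 | packages/spicelab/spicelab-0.3.1.tar.gz/spicelab-0.3.1/spicelab/io/ltspice_parser.py | _parse_subckts
-- ===== SOURCE A (Python) =====
-- def _parse_subckts(text: str) -> tuple[str, dict[str, tuple[list[str], list[str]]]]:
--     """Extract .SUBCKT blocks and return (text_without_blocks, subckt_map).
--
--     subckt_map[name] = (pins, body_lines)
--     """
--     lines = text.splitlines()
--     out: list[str] = []
--     subckts: dict[str, tuple[list[str], list[str]]] = {}
--     i = 0
--     while i < len(lines):
--         s = lines[i].strip()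
--         low = s.lower()
--         if low.startswith(".subckt"):
--             parts = s.split()
--             if len(parts) >= 3:
--                 name = parts[1]
--                 pins = parts[2:]
--                 body: list[str] = []
--                 i += 1
--                 while i < len(lines):
--                     ss = lines[i].strip()
--                     if ss.lower().startswith(".ends"):
--                         break
--                     body.append(lines[i])
--                     i += 1
--                 subckts[name] = (pins, body)
--                 # skip .ends
--                 while i < len(lines) and not lines[i].strip().lower().startswith(".ends"):
--                     i += 1
--                 i += 1
--                 continue
--         out.append(lines[i])
--         i += 1
--     return "\n".join(out), subckts
-- ===== SOURCE B (Python) =====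
-- def _parse_subckts(text: str) -> tuple[str, dict[str, tuple[list[str], list[str]]]]:
--     """Extract .SUBCKT blocks and return (text_without_blocks, subckt_map).
--
--     Flat state-machine: one pass over the lines with an optional open block.
--     """
--     out: list[str] = []
--     subckts: dict[str, tuple[list[str], list[str]]] = {}
--     current: tuple[str, list[str], list[str]] | None = None
--     for line in text.splitlines():
--         if current is None:
--             s = line.strip()
--             parts = s.split()
--             if s.lower().startswith(".subckt") and len(parts) >= 3:
--                 current = (parts[1], parts[2:], [])
--             else:
--                 out.append(line)
--         elif line.strip().lower().startswith(".ends"):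
--             name, pins, body = current
--             subckts[name] = (pins, body)
--             current = None
--         else:
--             current[2].append(line)
--     if current is not None:
--         name, pins, body = current
--         subckts[name] = (pins, body)
--     return "\n".join(out), subckts
-- ===== Notes on version B (the rewrite author's own statement) =====
-- stated objective: simpler
-- what changed: A's index-based while-loop with two nested inner scan loops (body collection and a redundant .ends-skip loop) is replaced by a single flat for-loop over the lines holding the currently open subckt block as explicit optional state.
import Mathlib
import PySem

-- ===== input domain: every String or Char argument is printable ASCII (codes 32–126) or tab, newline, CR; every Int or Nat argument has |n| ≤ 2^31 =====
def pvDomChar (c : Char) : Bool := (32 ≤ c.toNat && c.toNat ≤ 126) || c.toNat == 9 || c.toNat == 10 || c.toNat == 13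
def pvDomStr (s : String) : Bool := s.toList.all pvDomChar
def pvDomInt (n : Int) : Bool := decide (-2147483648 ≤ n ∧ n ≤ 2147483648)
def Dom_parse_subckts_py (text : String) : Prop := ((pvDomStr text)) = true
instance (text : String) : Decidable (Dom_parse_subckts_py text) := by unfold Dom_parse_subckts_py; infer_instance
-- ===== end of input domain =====

-- B replaces A's index-juggling while-loop with inner scan loops by a single flat
-- pass holding an optional open block as explicit state (objective: simpler).

-- ===== PORT A =====
-- A's inner body-collecting loop: returns (body, remaining suffix starting at the .ends line or []).
def collectBodyA : List String → List String × List String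
  | [] => ([], [])
  | l :: rest =>
    if PySem.Str.startswith (PySem.Str.lower (PySem.Str.strip l)) ".ends" then ([], l :: rest)
    else
      let p := collectBodyA rest
      (l :: p.1, p.2)

-- A's "skip .ends" loop: advance while the line does NOT start with .ends.
def skipEndsA : List String → List String
  | [] => []
  | l :: rest =>
    if PySem.Str.startswith (PySem.Str.lower (PySem.Str.strip l)) ".ends" then l :: rest
    else skipEndsA rest

theorem collectBodyA_length (xs : List String) : (collectBodyA xs).2.length ≤ xs.length := by
  induction xs with
  | nil => simp [collectBodyA]
  | cons l rest ih =>
    simp only [collectBodyA]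
    split
    · simp
    · simpa using Nat.le_succ_of_le ih

theorem skipEndsA_length (xs : List String) : (skipEndsA xs).length ≤ xs.length := by
  induction xs with
  | nil => simp [skipEndsA]
  | cons l rest ih =>
    simp only [skipEndsA]
    split
    · simp
    · exact Nat.le_succ_of_le ih

-- A's outer while-loop, on the suffix of lines from index i, threading the dict.
def loopA : List String → PySem.Dict String (List String × List String) →
    List String × PySem.Dict String (List String × List String)
  | [], d => ([], d)
  | l :: rest, d =>
    let s := PySem.Str.strip l
    let low := PySem.Str.lower s
    if PySem.Str.startswith low ".subckt" then
      let parts := PySem.Str.split₀ s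
      if 3 ≤ parts.length then
        let name := parts.getD 1 ""
        let pins := parts.drop 2
        let body := (collectBodyA rest).1
        let r := (collectBodyA rest).2
        let d' := d.insert name (pins, body)
        loopA ((skipEndsA r).drop 1) d'
      else
        let p := loopA rest d
        (l :: p.1, p.2)
    else
      let p := loopA rest d
      (l :: p.1, p.2)
  termination_by xs _ => xs.length
  decreasing_by
    · have h1 := collectBodyA_length rest
      have h2 := skipEndsA_length (collectBodyA rest).2
      have h3 : (List.drop 1 (skipEndsA (collectBodyA rest).2)).length ≤
          (skipEndsA (collectBodyA rest).2).length := by simp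
      simp only [List.length_cons]
      omega
    · simp
    · simp

def parse_subckts_py (text : String) : String × (List (String × List String × List String)) :=
  let lines := PySem.Str.splitlines text
  let p := loopA lines PySem.Dict.empty
  (PySem.Str.join "\n" p.1, p.2.items)

-- ===== PORT B =====
-- B's state: (out, subckts, optional open block (name, pins, body)).
def StB : Type :=
  List String × PySem.Dict String (List String × List String) ×
    Option (String × List String × List String)

def stepB (st : StB) (line : String) : StB :=
  match st with
  | (out, subckts, none) =>
    let s := PySem.Str.strip line
    let parts := PySem.Str.split₀ s
    if PySem.Str.startswith (PySem.Str.lower s) ".subckt" ∧ 3 ≤ parts.length then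
      (out, subckts, some (parts.getD 1 "", parts.drop 2, []))
    else
      (out ++ [line], subckts, none)
  | (out, subckts, some (name, pins, body)) =>
    if PySem.Str.startswith (PySem.Str.lower (PySem.Str.strip line)) ".ends" then
      (out, subckts.insert name (pins, body), none)
    else
      (out, subckts, some (name, pins, body ++ [line]))

def finishB (st : StB) :
    List String × PySem.Dict String (List String × List String) :=
  match st with
  | (out, subckts, none) => (out, subckts)
  | (out, subckts, some (name, pins, body)) => (out, subckts.insert name (pins, body))

def parse_subckts_py_alt (text : String) : String × (List (String × List String × List String)) :=
  let st := (PySem.Str.splitlines text).foldl stepB ([], PySem.Dict.empty, none)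
  let p := finishB st
  (PySem.Str.join "\n" p.1, p.2.items)

-- ===== PRECONDITION & SPEC =====
def Spec_parse_subckts_py (text : String) (out : String × (List (String × List String × List String))) : Prop := out = parse_subckts_py_alt text
instance (text : String) (out : String × (List (String × List String × List String))) : Decidable (Spec_parse_subckts_py text out) := by unfold Spec_parse_subckts_py; infer_instance

-- ===== CLAIM (what is proved, stated in full; the proofs are below) =====
def Claim_equal_parse_subckts_py : Prop := ∀ (text : String), Dom_parse_subckts_py text → Spec_parse_subckts_py text (parse_subckts_py text)

-- ===== LEMMAS AND PROOFS =====

-- The suffix collectBodyA leaves is [] or starts with a .ends line, so A's skip loop is a no-op on it.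
theorem skipEnds_collect (xs : List String) :
    skipEndsA (collectBodyA xs).2 = (collectBodyA xs).2 := by
  induction xs with
  | nil => simp [collectBodyA, skipEndsA]
  | cons l rest ih =>
    by_cases h : PySem.Str.startswith (PySem.Str.lower (PySem.Str.strip l)) ".ends" = true
    · simp only [collectBodyA]
      rw [if_pos h]
      simp only [skipEndsA]
      rw [if_pos h]
    · simp only [collectBodyA]
      rw [if_neg h]
      simpa using ih

-- Folding stepB from an open block consumes exactly the collectBodyA body, then
-- either ends still open (no .ends found) or closes the block and continues from the suffix.
theorem foldl_stepB_some (xs : List String) :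
    ∀ (out : List String) (d : PySem.Dict String (List String × List String))
      (name : String) (pins acc : List String),
    xs.foldl stepB (out, d, some (name, pins, acc)) =
      match (collectBodyA xs).2 with
      | [] => (out, d, some (name, pins, acc ++ (collectBodyA xs).1))
      | _ :: r' => r'.foldl stepB (out, d.insert name (pins, acc ++ (collectBodyA xs).1), none) := by
  induction xs with
  | nil => intro out d name pins acc; simp [collectBodyA]
  | cons l rest ih =>
    intro out d name pins acc
    simp only [List.foldl_cons, collectBodyA]
    by_cases h : PySem.Str.startswith (PySem.Str.lower (PySem.Str.strip l)) ".ends" = true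
    · rw [if_pos h]
      have hstep : stepB (out, d, some (name, pins, acc)) l
          = (out, d.insert name (pins, acc), none) := by
        simp only [stepB]; rw [if_pos h]
      rw [hstep]
      simp
    · rw [if_neg h]
      have hstep : stepB (out, d, some (name, pins, acc)) l
          = (out, d, some (name, pins, acc ++ [l])) := by
        simp only [stepB]; rw [if_neg h]
      rw [hstep, ih out d name pins (acc ++ [l])]
      cases hr : (collectBodyA rest).2 with
      | nil => simp
      | cons e r' => simp

-- Main invariant: B's fold from the closed state, then finishB, computes A's loop output
-- appended to the accumulated out, with the same dict.
theorem main_inv : ∀ (xs : List String) (d : PySem.Dict String (List String × List String))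
    (out : List String),
    finishB (xs.foldl stepB (out, d, none)) =
      (out ++ (loopA xs d).1, (loopA xs d).2) := by
  intro xs d
  induction xs, d using loopA.induct with
  | case1 d => intro out; simp [loopA, finishB]
  | case2 l rest d s low hsub parts hlen name pins body r d' ih =>
    intro out
    have hA : loopA (l :: rest) d = loopA ((skipEndsA r).drop 1) d' := by
      simp only [loopA]
      rw [if_pos hsub, if_pos hlen]
    have hstep : stepB (out, d, none) l = (out, d, some (name, pins, [])) := by
      simp only [stepB]
      rw [if_pos (show _ ∧ _ from ⟨hsub, hlen⟩)]
    simp only [List.foldl_cons, hstep]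
    rw [foldl_stepB_some rest out d name pins []]
    simp only [List.nil_append]
    cases hr : (collectBodyA rest).2 with
    | nil =>
      have hA2 : loopA (l :: rest) d = ([], d') := by
        rw [hA]
        simp only [r, hr, skipEndsA, List.drop_nil, loopA]
      rw [hA2]
      simp [finishB, d', body]
    | cons e r' =>
      have hskip : skipEndsA r = r := by simpa only [r] using skipEnds_collect rest
      have hir : List.drop 1 (skipEndsA r) = r' := by
        rw [hskip]; simp only [r, hr, List.drop_succ_cons, List.drop_zero]
      have hA2 : loopA (l :: rest) d = loopA r' d' := by rw [hA, hir]
      rw [hA2]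
      have ih' := ih out
      rw [hir] at ih'
      exact ih'
  | case3 l rest d s low hsub parts hlen ih =>
    intro out
    have hstep : stepB (out, d, none) l = (out ++ [l], d, none) := by
      simp only [stepB]
      rw [if_neg (show ¬ (_ ∧ _) from fun h => hlen h.2)]
    have hA : loopA (l :: rest) d = (l :: (loopA rest d).1, (loopA rest d).2) := by
      simp only [loopA]
      rw [if_pos hsub, if_neg hlen]
    simp only [List.foldl_cons, hstep]
    rw [ih (out ++ [l]), hA]
    simp
  | case4 l rest d s low hsub ih =>
    intro out
    have hstep : stepB (out, d, none) l = (out ++ [l], d, none) := by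
      simp only [stepB]
      rw [if_neg (show ¬ (_ ∧ _) from fun h => hsub h.1)]
    have hA : loopA (l :: rest) d = (l :: (loopA rest d).1, (loopA rest d).2) := by
      simp only [loopA]
      rw [if_neg hsub]
    simp only [List.foldl_cons, hstep]
    rw [ih (out ++ [l]), hA]
    simp

-- ===== VERDICT (by name: the statement is the Claim_ definition above) =====
theorem parse_subckts_py_spec : Claim_equal_parse_subckts_py := by
  intro text _
  unfold Spec_parse_subckts_py
  simp only [parse_subckts_py, parse_subckts_py_alt]
  rw [main_inv (PySem.Str.splitlines text) PySem.Dict.empty []]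
  simp
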